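-- pv_equiv track=rewrite | github.com/ahnobari/NLP_Mixture | DataUtils/_MATH.py | find_first_unopened_closing_brace
-- ===== SOURCE A (Python) =====
-- def find_first_unopened_closing_brace(a):
--     x = 0
--     for i, char in enumerate(a):
--         if char == '{':
--             x += 1
--         elif char == '}':
--             x -= 1
--         if x == -1:
--             return a[:i]
--
--     return a
-- ===== SOURCE B (Python) =====
-- def find_first_unopened_closing_brace(a):
--     opens = [i for i, c in enumerate(a) if c == '{']
--     closes = [i for i, c in enumerate(a) if c == '}']
--     for j, cpos in enumerate(closes):
--         if j >= len(opens) or opens[j] > cpos: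
--             return a[:cpos]
--     return a
-- ===== Notes on version B (the rewrite author's own statement) =====
-- stated objective: alternative
-- what changed: Instead of a running balance counter, B extracts the position lists of '{' and '}' and pairs them up: the first '}' is unmatched exactly when it is the j-th close and there is no j-th open before it (j >= len(opens) or opens[j] > cpos); B slices there.
import Mathlib
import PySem

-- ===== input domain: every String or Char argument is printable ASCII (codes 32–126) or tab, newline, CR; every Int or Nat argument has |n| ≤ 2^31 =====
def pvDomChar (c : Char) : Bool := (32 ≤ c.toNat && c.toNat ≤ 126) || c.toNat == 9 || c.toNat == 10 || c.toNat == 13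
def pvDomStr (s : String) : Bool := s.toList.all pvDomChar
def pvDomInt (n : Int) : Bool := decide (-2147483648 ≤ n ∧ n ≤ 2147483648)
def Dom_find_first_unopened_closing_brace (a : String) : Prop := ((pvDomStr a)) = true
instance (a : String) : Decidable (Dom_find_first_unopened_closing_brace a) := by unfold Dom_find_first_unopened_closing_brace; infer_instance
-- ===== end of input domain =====

-- B replaces A's running-balance counter by greedy pair matching on the extracted position
-- lists of '{' and '}': the cut is at the first j-th '}' with no j-th '{' before it; same cost, alternative algorithm.


-- ===== PORT A =====
-- 'for i, char in enumerate(a)' with running counter x; early return of a[:i] when x hits -1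
def ffucbLoopA (a : String) : Int → List (Int × Char) → String
  | _, [] => a
  | x, (i, c) :: rest =>
    let x' := if c = '{' then x + 1 else if c = '}' then x - 1 else x
    if x' = -1 then PySem.Str.slice a none (some i)
    else ffucbLoopA a x' rest

def find_first_unopened_closing_brace (a : String) : String :=
  ffucbLoopA a 0 (PySem.List.enumerate a.toList)

-- ===== PORT B =====
-- 'for j, cpos in enumerate(closes): if j >= len(opens) or opens[j] > cpos: return a[:cpos]'
-- (getD is exact for opens[j]: it is only read after the guard j < len(opens), mirroring Python's short-circuit 'or')
def ffucbLoopB (a : String) (opens : List Int) : Nat → List Int → String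
  | _, [] => a
  | j, cpos :: rest =>
    if opens.length ≤ j then PySem.Str.slice a none (some cpos)
    else if opens.getD j 0 > cpos then PySem.Str.slice a none (some cpos)
    else ffucbLoopB a opens (j + 1) rest

def find_first_unopened_closing_brace_alt (a : String) : String :=
  let opens := ((PySem.List.enumerate a.toList).filter (fun p => p.2 == '{')).map Prod.fst
  let closes := ((PySem.List.enumerate a.toList).filter (fun p => p.2 == '}')).map Prod.fst
  ffucbLoopB a opens 0 closes

-- ===== PRECONDITION & SPEC =====
def Spec_find_first_unopened_closing_brace (a : String) (out : String) : Prop := out = find_first_unopened_closing_brace_alt a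
instance (a : String) (out : String) : Decidable (Spec_find_first_unopened_closing_brace a out) := by unfold Spec_find_first_unopened_closing_brace; infer_instance

-- ===== CLAIM (what is proved, stated in full; the proofs are below) =====
def Claim_equal_find_first_unopened_closing_brace : Prop := ∀ (a : String), Dom_find_first_unopened_closing_brace a → Spec_find_first_unopened_closing_brace a (find_first_unopened_closing_brace a)

-- ===== LEMMAS AND PROOFS =====

-- Invariant linking the two loops: after a consumed prefix contributing the open positions OP
-- (all matched except the last OP.length - j of them), A's counter is OP.length - j and B is about
-- to test the j-th close against the j-th open of OP ++ opens(ps).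
theorem ffucb_key (a : String) : ∀ (ps : List (Int × Char)) (OP : List Int) (j : Nat),
    j ≤ OP.length →
    (∀ q ∈ OP, ∀ p ∈ ps, q < p.1) →
    ps.Pairwise (fun p q => p.1 < q.1) →
    ffucbLoopA a ((OP.length : Int) - j) ps =
      ffucbLoopB a (OP ++ (ps.filter (fun p => p.2 == '{')).map Prod.fst) j
        ((ps.filter (fun p => p.2 == '}')).map Prod.fst) := by
  intro ps
  induction ps with
  | nil => intro OP j _ _ _; simp [ffucbLoopA, ffucbLoopB]
  | cons p rest ih =>
    intro OP j hj hOP hpw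
    obtain ⟨i, c⟩ := p
    have hOPrest : ∀ q ∈ OP, ∀ p ∈ rest, q < p.1 := fun q hq p hp => hOP q hq p (List.mem_cons_of_mem _ hp)
    have hpwrest : rest.Pairwise (fun p q => p.1 < q.1) := (List.pairwise_cons.mp hpw).2
    have hhead : ∀ p ∈ rest, i < p.1 := fun p hp => (List.pairwise_cons.mp hpw).1 p hp
    by_cases hc : c = '{'
    · -- open brace: counter goes up, position i joins the open list
      subst hc
      have hne : ¬ (((OP.length : Int) - j) + 1 = -1) := by omega
      rw [show ffucbLoopA a ((OP.length : Int) - j) ((i, '{') :: rest) =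
            ffucbLoopA a (((OP.length : Int) - j) + 1) rest by simp [ffucbLoopA, hne]]
      have hcnt : (((OP.length : Int) - j) + 1) = (((OP ++ [i]).length : Int) - j) := by
        simp; omega
      rw [hcnt, ih (OP ++ [i]) j (by simp; omega)
            (by intro q hq p hp
                rcases List.mem_append.mp hq with h | h
                · exact hOPrest q h p hp
                · simp at h; subst h; exact hhead p hp)
            hpwrest]
      simp [List.append_assoc]
    · by_cases hc2 : c = '}'
      · -- close brace: this is the j-th close; B tests it against the j-th open
        subst hc2
        have hcl : (((i, '}') :: rest).filter (fun p => p.2 == '}')).map Prod.fst =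
            i :: ((rest.filter (fun p => p.2 == '}')).map Prod.fst) := by
          simp
        have hop : (((i, '}') :: rest).filter (fun p => p.2 == '{')).map Prod.fst =
            (rest.filter (fun p => p.2 == '{')).map Prod.fst := by
          simp
        by_cases hje : j = OP.length
        · -- counter is 0: A hits -1 and returns a[:i]; B's test fires (no j-th open before i)
          subst hje
          have hx : ((OP.length : Int) - OP.length) - 1 = -1 := by omega
          rw [show ffucbLoopA a ((OP.length : Int) - OP.length) ((i, '}') :: rest) =
                PySem.Str.slice a none (some i) by simp [ffucbLoopA]]
          rw [hcl, hop]
          rcases hORe : (rest.filter (fun p => p.2 == '{')).map Prod.fst with _ | ⟨o, os⟩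
          · rw [hORe]; simp [ffucbLoopB]
          · rw [hORe]
            have ho : i < o := by
              have : o ∈ (rest.filter (fun p => p.2 == '{')).map Prod.fst := by
                rw [hORe]; exact List.mem_cons_self
              simp only [List.mem_map, List.mem_filter] at this
              obtain ⟨q, ⟨hq, _⟩, hqe⟩ := this
              have := hhead q hq
              omega
            have hlen : ¬ ((OP ++ o :: os).length ≤ OP.length) := by simp
            have hget : (OP ++ o :: os).getD OP.length 0 = o := by
              rw [List.getD_eq_getElem _ _ (by simp)]
              simp
            rw [show ffucbLoopB a (OP ++ o :: os) OP.length
                  (i :: (rest.filter (fun p => p.2 == '}')).map Prod.fst) =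
                  if (OP ++ o :: os).length ≤ OP.length then PySem.Str.slice a none (some i)
                  else if (OP ++ o :: os).getD OP.length 0 > i then PySem.Str.slice a none (some i)
                  else ffucbLoopB a (OP ++ o :: os) (OP.length + 1)
                    ((rest.filter (fun p => p.2 == '}')).map Prod.fst) from rfl]
            rw [if_neg hlen, hget, if_pos (by omega)]
        · -- counter still positive: the j-th open is in OP, before i, so B moves on too
          have hjlt : j < OP.length := lt_of_le_of_ne hj hje
          have hne : ¬ (((OP.length : Int) - j) - 1 = -1) := by omega
          rw [show ffucbLoopA a ((OP.length : Int) - j) ((i, '}') :: rest) =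
                ffucbLoopA a (((OP.length : Int) - j) - 1) rest by simp [ffucbLoopA, hne]]
          rw [hcl, hop]
          set OR := (rest.filter (fun p => p.2 == '{')).map Prod.fst with hOR
          have hlen : ¬ ((OP ++ OR).length ≤ j) := by simp; omega
          have hget : (OP ++ OR).getD j 0 = OP[j] := by
            rw [List.getD_eq_getElem _ _ (by simp; omega)]
            simp [List.getElem_append_left hjlt]
          have hlti : OP[j] < i := hOP _ (List.getElem_mem hjlt) (i, '}') List.mem_cons_self
          rw [show ffucbLoopB a (OP ++ OR) j
                (i :: (rest.filter (fun p => p.2 == '}')).map Prod.fst) =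
                if (OP ++ OR).length ≤ j then PySem.Str.slice a none (some i)
                else if (OP ++ OR).getD j 0 > i then PySem.Str.slice a none (some i)
                else ffucbLoopB a (OP ++ OR) (j + 1)
                  ((rest.filter (fun p => p.2 == '}')).map Prod.fst) from rfl]
          rw [if_neg hlen, hget, if_neg (by omega)]
          have hcnt : (((OP.length : Int) - j) - 1) = ((OP.length : Int) - ((j : Nat) + 1 : Nat)) := by
            push_cast; omega
          rw [hcnt]
          exact ih OP (j + 1) (by omega) hOPrest hpwrest
      · -- other char: nothing changes
        have hne : ¬ (((OP.length : Int) - j) = -1) := by omega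
        rw [show ffucbLoopA a ((OP.length : Int) - j) ((i, c) :: rest) =
              ffucbLoopA a ((OP.length : Int) - j) rest by simp [ffucbLoopA, hc, hc2, hne]]
        have := ih OP j hj hOPrest hpwrest
        simpa [List.filter_cons, hc, hc2] using this

-- ===== VERDICT (by name: the statement is the Claim_ definition above) =====
theorem find_first_unopened_closing_brace_spec : Claim_equal_find_first_unopened_closing_brace := by
  intro a _
  unfold Spec_find_first_unopened_closing_brace
  unfold find_first_unopened_closing_brace find_first_unopened_closing_brace_alt
  have := ffucb_key a (PySem.List.enumerate a.toList) [] 0 (by simp)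
    (by intro q hq; simp at hq) (PySem.List.pairwise_lt_enumerate _ _)
  simpa using this
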